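-- pv_equiv track=rewrite | github.com/DanielSdc/TopicosIA | Unidad2/RecocidoSimulado/src/soluciones.py | dividir_solucion_en_rutas
-- ===== SOURCE A (Python) =====
-- def dividir_solucion_en_rutas(solucion):
--
--     # Dividir el arreglo de solución en uno para cada CD y sus tiendas asignadas
--     rutas: list[list[int]] = []
--     ruta_actual: list[int] = []
--     for nodo in solucion:
--         if es_cd(nodo):
--             if not ruta_actual:
--                 ruta_actual.append(nodo)
--             else:
--                 ruta_actual.append(nodo)
--                 rutas.append(ruta_actual)
--                 ruta_actual = []
--         else:
--             if ruta_actual: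
--                 ruta_actual.append(nodo)
--             else:
--                 continue
--     return rutas
--
-- def es_cd(nodo_id):
--     return 1 <= nodo_id <= 10
-- ===== SOURCE B (Python) =====
-- def dividir_solucion_en_rutas(solucion):
--     # Scan by positions: repeatedly find an opening CD and the next closing CD,
--     # emit the slice between them; no incremental route accumulator.
--     def primer_cd(xs):
--         for j, x in enumerate(xs):
--             if es_cd(x):
--                 return j
--         return None
--     rutas = []
--     rest = solucion
--     while True:
--         j = primer_cd(rest)
--         if j is None:
--             return rutas
--         rest = rest[j:]
--         k = primer_cd(rest[1:])
--         if k is None: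
--             return rutas
--         rutas.append(rest[:k + 2])
--         rest = rest[k + 2:]
--
-- def es_cd(nodo_id):
--     return 1 <= nodo_id <= 10
-- ===== Notes on version B (the rewrite author's own statement) =====
-- stated objective: alternative
-- what changed: Replaced the incremental state-machine accumulator loop with a position-based scan that repeatedly finds the opening and closing CD indices and emits each route as one slice.
import Mathlib
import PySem

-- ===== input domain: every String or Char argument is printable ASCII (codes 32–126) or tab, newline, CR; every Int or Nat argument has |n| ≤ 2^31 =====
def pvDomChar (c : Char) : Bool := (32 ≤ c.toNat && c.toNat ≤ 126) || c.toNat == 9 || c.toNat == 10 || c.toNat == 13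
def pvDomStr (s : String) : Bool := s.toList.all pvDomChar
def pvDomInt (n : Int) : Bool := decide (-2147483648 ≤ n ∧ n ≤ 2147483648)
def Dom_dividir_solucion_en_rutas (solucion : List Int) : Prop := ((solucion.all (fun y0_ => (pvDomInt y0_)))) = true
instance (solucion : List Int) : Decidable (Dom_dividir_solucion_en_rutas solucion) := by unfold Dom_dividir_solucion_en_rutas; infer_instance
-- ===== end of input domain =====

-- B replaces A's state-machine accumulator loop by a position-based scan that slices
-- each route out between its opening and closing CD index (objective: alternative).

-- ===== PORT A =====
def es_cd (nodo_id : Int) : Bool := decide (1 ≤ nodo_id ∧ nodo_id ≤ 10)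

def dividir_solucion_en_rutas (solucion : List Int) : List (List Int) :=
  (solucion.foldl
    (fun (st : List (List Int) × List Int) nodo =>
      let rutas := st.1
      let ruta_actual := st.2
      if es_cd nodo then
        if ruta_actual.isEmpty then (rutas, ruta_actual ++ [nodo])
        else (rutas ++ [ruta_actual ++ [nodo]], [])
      else
        if !ruta_actual.isEmpty then (rutas, ruta_actual ++ [nodo])
        else (rutas, ruta_actual))
    ([], [])).1

-- ===== PORT B =====
-- primer_cd: Source B's enumerate loop returning the first CD index (None if none).
def primer_cd : List Int → Option Nat
  | [] => none
  | x :: xs => if es_cd x then some 0 else (primer_cd xs).map (· + 1)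

-- Source B's while-loop; Python slices rest[j:], rest[:k+2], rest[k+2:] with nonnegative
-- indices are exactly List.drop / List.take (both clamp).
def pv_altGo (rutas : List (List Int)) (rest : List Int) : List (List Int) :=
  match h : primer_cd rest with
  | none => rutas
  | some j =>
    let rest1 := rest.drop j
    match primer_cd (rest1.drop 1) with
    | none => rutas
    | some k => pv_altGo (rutas ++ [rest1.take (k + 2)]) (rest1.drop (k + 2))
termination_by rest.length
decreasing_by
  have hne : rest ≠ [] := by intro e; subst e; simp [primer_cd] at h
  have : 0 < rest.length := List.length_pos_iff.mpr hne
  simp; omega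

def dividir_solucion_en_rutas_alt (solucion : List Int) : List (List Int) :=
  pv_altGo [] solucion

-- ===== PRECONDITION & SPEC =====
def Spec_dividir_solucion_en_rutas (solucion : List Int) (out : List (List Int)) : Prop := out = dividir_solucion_en_rutas_alt solucion
instance (solucion : List Int) (out : List (List Int)) : Decidable (Spec_dividir_solucion_en_rutas solucion out) := by unfold Spec_dividir_solucion_en_rutas; infer_instance

-- ===== CLAIM (what is proved, stated in full; the proofs are below) =====
def Claim_equal_dividir_solucion_en_rutas : Prop := ∀ (solucion : List Int), Dom_dividir_solucion_en_rutas solucion → Spec_dividir_solucion_en_rutas solucion (dividir_solucion_en_rutas solucion)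

-- ===== LEMMAS AND PROOFS =====

-- Reference specification: mutual recursion "searching for an opening CD" / "inside a route".
mutual
def routesSpec : List Int → List (List Int)
  | [] => []
  | n :: rest => if es_cd n then goSpec [n] rest else routesSpec rest
def goSpec (acc : List Int) : List Int → List (List Int)
  | [] => []
  | n :: rest => if es_cd n then (acc ++ [n]) :: routesSpec rest else goSpec (acc ++ [n]) rest
end

theorem routesSpec_none (xs : List Int) (h : primer_cd xs = none) : routesSpec xs = [] := by
  induction xs with
  | nil => rfl
  | cons x xs ih =>
    simp only [primer_cd] at h
    by_cases hx : es_cd x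
    · simp [hx] at h
    · simp [hx] at h; simp [routesSpec, hx, ih h]

theorem goSpec_none (xs : List Int) (h : primer_cd xs = none) : ∀ acc, goSpec acc xs = [] := by
  induction xs with
  | nil => intro acc; rfl
  | cons x xs ih =>
    intro acc
    simp only [primer_cd] at h
    by_cases hx : es_cd x
    · simp [hx] at h
    · simp [hx] at h; simp [goSpec, hx, ih h]

theorem routesSpec_some (xs : List Int) (j : Nat) (h : primer_cd xs = some j) :
    ∃ c t, xs.drop j = c :: t ∧ es_cd c = true ∧ routesSpec xs = goSpec [c] t := by
  induction xs generalizing j with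
  | nil => simp [primer_cd] at h
  | cons x xs ih =>
    simp only [primer_cd] at h
    by_cases hx : es_cd x
    · simp [hx] at h; subst h
      exact ⟨x, xs, rfl, hx, by simp [routesSpec, hx]⟩
    · simp [hx] at h
      obtain ⟨j', hj', rfl⟩ := h
      obtain ⟨c, t, hd, hc, hr⟩ := ih j' hj'
      exact ⟨c, t, by simpa using hd, hc, by simp [routesSpec, hx, hr]⟩

theorem goSpec_some (xs : List Int) (k : Nat) (h : primer_cd xs = some k) :
    ∀ acc, goSpec acc xs = (acc ++ xs.take (k + 1)) :: routesSpec (xs.drop (k + 1)) := by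
  induction xs generalizing k with
  | nil => simp [primer_cd] at h
  | cons x xs ih =>
    intro acc
    simp only [primer_cd] at h
    by_cases hx : es_cd x
    · simp [hx] at h; subst h; simp [goSpec, hx]
    · simp [hx] at h
      obtain ⟨k', hk', rfl⟩ := h
      simp [goSpec, hx, ih k' hk']

theorem altGo_eq (n : Nat) : ∀ xs : List Int, xs.length ≤ n → ∀ rutas,
    pv_altGo rutas xs = rutas ++ routesSpec xs := by
  induction n with
  | zero =>
    intro xs hlen rutas
    have : xs = [] := List.eq_nil_of_length_eq_zero (Nat.le_zero.mp hlen)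
    subst this
    simp [pv_altGo, primer_cd, routesSpec]
  | succ n ih =>
    intro xs hlen rutas
    rw [pv_altGo]
    split
    · next h => simp [routesSpec_none xs h]
    · next j h =>
      obtain ⟨c, t, hd, hc, hr⟩ := routesSpec_some xs j h
      have hlt : t.length < xs.length := by
        have h1 : (List.drop j xs).length = xs.length - j := List.length_drop
        rw [hd] at h1
        have hne : xs ≠ [] := by intro e; subst e; simp [primer_cd] at h
        have hp : 0 < xs.length := List.length_pos_iff.mpr hne
        simp at h1; omega
      simp only [hd]
      rw [show List.drop 1 (c :: t) = t from rfl]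
      cases h2 : primer_cd t with
      | none => simp [hr, goSpec_none t h2]
      | some k =>
        have hgo := goSpec_some t k h2 [c]
        have hlen' : (t.drop (k + 1)).length ≤ n := by
          have := List.length_drop (l := t) (i := k + 1); omega
        dsimp only
        rw [show List.take (k + 2) (c :: t) = c :: t.take (k + 1) from rfl,
            show List.drop (k + 2) (c :: t) = t.drop (k + 1) from rfl]
        rw [ih _ hlen' (rutas ++ [c :: t.take (k + 1)])]
        simp [hr, hgo]

theorem foldA_eq (xs : List Int) : ∀ (rutas : List (List Int)) (acc : List Int),
    (xs.foldl
      (fun (st : List (List Int) × List Int) nodo =>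
        let rutas := st.1
        let ruta_actual := st.2
        if es_cd nodo then
          if ruta_actual.isEmpty then (rutas, ruta_actual ++ [nodo])
          else (rutas ++ [ruta_actual ++ [nodo]], [])
        else
          if !ruta_actual.isEmpty then (rutas, ruta_actual ++ [nodo])
          else (rutas, ruta_actual))
      (rutas, acc)).1
    = rutas ++ (if acc.isEmpty then routesSpec xs else goSpec acc xs) := by
  induction xs with
  | nil =>
    intro rutas acc
    cases acc <;> simp [routesSpec, goSpec]
  | cons x xs ih =>
    intro rutas acc
    by_cases hx : es_cd x
    · cases acc with
      | nil =>
        simp only [List.foldl_cons, hx, List.isEmpty_nil, if_true, List.nil_append]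
        rw [ih rutas [x]]
        simp [routesSpec, hx]
      | cons a as =>
        simp only [List.foldl_cons, hx, List.isEmpty_cons, if_true]
        simp only [Bool.false_eq_true, if_false]
        rw [ih (rutas ++ [a :: as ++ [x]]) []]
        simp [goSpec, hx]
    · cases acc with
      | nil =>
        simp only [List.foldl_cons, hx, List.isEmpty_nil]
        simp only [Bool.false_eq_true, if_false, Bool.not_true]
        rw [ih rutas []]
        simp [routesSpec, hx]
      | cons a as =>
        simp only [List.foldl_cons, hx, List.isEmpty_cons]
        simp only [Bool.false_eq_true, if_false, Bool.not_false, if_true]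
        rw [ih rutas (a :: as ++ [x])]
        simp [goSpec, hx]

-- ===== VERDICT (by name: the statement is the Claim_ definition above) =====
theorem dividir_solucion_en_rutas_spec : Claim_equal_dividir_solucion_en_rutas := by
  intro solucion _
  unfold Spec_dividir_solucion_en_rutas dividir_solucion_en_rutas dividir_solucion_en_rutas_alt
  rw [foldA_eq solucion [] []]
  rw [altGo_eq solucion.length solucion le_rfl []]
  simp
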